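-- pv_equiv track=rewrite | github.com/yoonseonchoi/3-2_CT_assignment | Practice6/brickWall.py | fewestNumber
-- ===== SOURCE A (Python) =====
-- from collections import defaultdict
--
-- def fewestNumber(bricks):
--     hashmap = defaultdict(int)
--     cnt = 0
--     for row in bricks:
--         sum = 0
--         for i in range(len(row)-1):
--             sum += row[i]
--             hashmap[sum] += 1
--             cnt = max(cnt, hashmap[sum])
--     return len(bricks) - cnt
-- ===== SOURCE B (Python) =====
-- def fewestNumber(bricks):
--     # collect every interior edge position (prefix sum) of every row, flat
--     cuts = []
--     for row in bricks:
--         s = 0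
--         for w in row[:-1]:
--             s += w
--             cuts.append(s)
--     # sort the edge positions; equal edges become adjacent, so the most
--     # common edge is the longest run — scan for the longest run of equals
--     cuts.sort()
--     best = 0
--     run = 0
--     prev = None
--     for c in cuts:
--         run = run + 1 if c == prev else 1
--         if run > best:
--             best = run
--         prev = c
--     return len(bricks) - best
-- ===== Notes on version B (the rewrite author's own statement) =====
-- stated objective: alternative
-- what changed: B replaces A's hash-map frequency counting with a running maximum by a sort-then-scan algorithm: it collects all interior-edge prefix sums into one flat list, sorts it so equal edges become adjacent, and finds the most common edge as the longest run of equal neighbours.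
import Mathlib
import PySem

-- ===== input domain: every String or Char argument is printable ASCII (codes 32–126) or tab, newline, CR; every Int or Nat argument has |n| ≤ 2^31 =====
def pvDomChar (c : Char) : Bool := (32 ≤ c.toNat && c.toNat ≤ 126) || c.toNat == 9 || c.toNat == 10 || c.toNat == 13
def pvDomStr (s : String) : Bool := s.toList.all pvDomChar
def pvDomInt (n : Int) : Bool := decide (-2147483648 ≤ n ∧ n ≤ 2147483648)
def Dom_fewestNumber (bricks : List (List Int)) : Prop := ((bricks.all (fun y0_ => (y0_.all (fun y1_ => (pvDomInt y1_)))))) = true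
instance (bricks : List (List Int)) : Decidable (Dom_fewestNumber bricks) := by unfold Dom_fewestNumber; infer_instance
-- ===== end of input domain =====

-- B replaces A's hash-map counting with a running max by a sort-then-scan:
-- sort all interior-edge prefix sums and find the longest run of equal neighbours.

-- ===== PORT A =====
-- literal port of A: defaultdict as Dict with modify (d[k] += 1), running max cnt
def fewestNumber (bricks : List (List Int)) : Int :=
  let st := bricks.foldl
    (fun (p : PySem.Dict Int Int × Int) row =>
      let inner := (PySem.List.pyRange 0 ((row.length : Int) - 1) 1).foldl
        (fun (q : PySem.Dict Int Int × Int × Int) i =>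
          let s := q.2.2 + PySem.List.pyGetD row i 0
          let d := q.1.modify s 0 (· + 1)
          (d, max q.2.1 (d.getD s 0), s))
        (p.1, p.2, 0)
      (inner.1, inner.2.1))
    (PySem.Dict.empty, 0)
  (bricks.length : Int) - st.2

-- ===== PORT B =====
-- the body of B's scan loop: state (best, run, prev)
def pvScanStep (q : Int × Int × Option Int) (c : Int) : Int × Int × Option Int :=
  let run := if some c = q.2.2 then q.2.1 + 1 else 1
  (if run > q.1 then run else q.1, run, some c)

-- literal port of B: flat list of cuts, sort, then longest-run scan
def fewestNumber_alt (bricks : List (List Int)) : Int :=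
  let cuts := bricks.foldl
    (fun (acc : List Int) row =>
      ((PySem.List.slice row none (some (-1))).foldl
        (fun (q : List Int × Int) w => (q.1 ++ [q.2 + w], q.2 + w)) (acc, 0)).1)
    []
  let st := (PySem.List.sorted cuts (fun x => x) false).foldl pvScanStep (0, 0, none)
  (bricks.length : Int) - st.1

-- ===== PRECONDITION & SPEC =====
def Spec_fewestNumber (bricks : List (List Int)) (out : Int) : Prop := out = fewestNumber_alt bricks
instance (bricks : List (List Int)) (out : Int) : Decidable (Spec_fewestNumber bricks out) := by unfold Spec_fewestNumber; infer_instance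

-- ===== CLAIM (what is proved, stated in full; the proofs are below) =====
def Claim_equal_fewestNumber : Prop := ∀ (bricks : List (List Int)), Dom_fewestNumber bricks → Spec_fewestNumber bricks (fewestNumber bricks)

-- ===== LEMMAS AND PROOFS =====

-- prefix sums of xs starting from s (the cut positions contributed by one row)
def pvCutsFrom (s : Int) : List Int → List Int
  | [] => []
  | w :: t => (s + w) :: pvCutsFrom (s + w) t

def pvCuts (bricks : List (List Int)) : List Int :=
  bricks.flatMap (fun row => pvCutsFrom 0 row.dropLast)

-- the flat per-cut step of A (dict update + running max)
def pvStep (p : PySem.Dict Int Int × Int) (x : Int) : PySem.Dict Int Int × Int :=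
  let d := p.1.modify x 0 (· + 1)
  (d, max p.2 (d.getD x 0))

-- the invariant A's running max maintains: cnt bounds every count and is attained (or 0)
def pvInv (d : PySem.Dict Int Int) (c : Int) : Prop :=
  0 ≤ c ∧ (∀ v, d.getD v 0 ≤ c) ∧ (c = 0 ∨ ∃ v, d.getD v 0 = c)

-- B's cut-building inner loop builds exactly the prefix sums
theorem pvB_inner (xs : List Int) (acc : List Int) (s : Int) :
    xs.foldl (fun (q : List Int × Int) w => (q.1 ++ [q.2 + w], q.2 + w)) (acc, s)
      = (acc ++ pvCutsFrom s xs, s + xs.sum) := by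
  induction xs generalizing acc s with
  | nil => simp [pvCutsFrom]
  | cons w t ih =>
    rw [List.foldl_cons]
    show (t.foldl (fun (q : List Int × Int) w => (q.1 ++ [q.2 + w], q.2 + w)) (acc ++ [s + w], s + w))
        = (acc ++ pvCutsFrom s (w :: t), s + (w :: t).sum)
    rw [ih]
    simp only [pvCutsFrom, List.sum_cons, List.append_assoc, List.singleton_append, Prod.mk.injEq]
    exact ⟨trivial, by ring⟩

-- A's inner loop over the row elements is the flat pvStep fold over the cuts
theorem pvA_inner (xs : List Int) (d : PySem.Dict Int Int) (c s : Int) :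
    xs.foldl (fun (q : PySem.Dict Int Int × Int × Int) w =>
        let s' := q.2.2 + w
        let d' := q.1.modify s' 0 (· + 1)
        (d', max q.2.1 (d'.getD s' 0), s')) (d, c, s)
      = (((pvCutsFrom s xs).foldl pvStep (d, c)).1,
         ((pvCutsFrom s xs).foldl pvStep (d, c)).2, s + xs.sum) := by
  induction xs generalizing d c s with
  | nil => simp [pvCutsFrom]
  | cons w t ih =>
    rw [List.foldl_cons]
    show (t.foldl (fun (q : PySem.Dict Int Int × Int × Int) w =>
        let s' := q.2.2 + w
        let d' := q.1.modify s' 0 (· + 1)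
        (d', max q.2.1 (d'.getD s' 0), s'))
        (d.modify (s + w) 0 (· + 1),
         max c ((d.modify (s + w) 0 (· + 1)).getD (s + w) 0), s + w))
      = (((pvCutsFrom s (w :: t)).foldl pvStep (d, c)).1,
         ((pvCutsFrom s (w :: t)).foldl pvStep (d, c)).2, s + (w :: t).sum)
    rw [ih]
    simp only [pvCutsFrom, List.foldl_cons, List.sum_cons, pvStep, Prod.mk.injEq]
    exact ⟨trivial, trivial, by ring⟩

-- converting A's index loop over range(len(row)-1) to a loop over row.dropLast
theorem pvA_idx (row : List Int)
    (F : (PySem.Dict Int Int × Int × Int) → Int → (PySem.Dict Int Int × Int × Int))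
    (init : PySem.Dict Int Int × Int × Int) :
    (PySem.List.pyRange 0 ((row.length : Int) - 1) 1).foldl
        (fun q i => F q (PySem.List.pyGetD row i 0)) init
      = row.dropLast.foldl F init := by
  rcases row with _ | ⟨a, t⟩
  · rw [PySem.List.pyRange_one_eq_nil (by norm_num : ((List.length ([] : List Int) : Int) - 1) ≤ 0)]
    rfl
  · have hlen : ((a :: t).length : Int) - 1 = (((a :: t).dropLast).length : Int) := by
      simp
    rw [hlen]
    have h : ∀ (q : PySem.Dict Int Int × Int × Int),
        ∀ i ∈ PySem.List.pyRange 0 ((((a :: t).dropLast).length : Int)) 1,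
        F q (PySem.List.pyGetD (a :: t) i 0) = F q (PySem.List.pyGetD ((a :: t).dropLast) i 0) := by
      intro q i hi
      have hm := (PySem.List.mem_pyRange_one).mp hi
      have h1' : i < ((a :: t).length : Int) := by
        have h2 := hm.2
        simp only [List.length_dropLast, List.length_cons] at h2 ⊢
        omega
      rw [PySem.List.pyGetD_eq_getElem _ 0 hm.1 h1',
          PySem.List.pyGetD_eq_getElem _ 0 hm.1 hm.2, List.getElem_dropLast]
    rw [PySem.List.foldl_congr_mem _ _ (fun q i => F q (PySem.List.pyGetD ((a :: t).dropLast) i 0)) init h]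
    exact PySem.List.foldl_pyRange_zero_pyGetD' ((a :: t).dropLast) 0 F init

-- one row of A, assembled
theorem pvA_row (row : List Int) (d : PySem.Dict Int Int) (c : Int) :
    (PySem.List.pyRange 0 ((row.length : Int) - 1) 1).foldl
      (fun (q : PySem.Dict Int Int × Int × Int) i =>
        let s := q.2.2 + PySem.List.pyGetD row i 0
        let d := q.1.modify s 0 (· + 1)
        (d, max q.2.1 (d.getD s 0), s)) (d, c, 0)
    = (((pvCutsFrom 0 row.dropLast).foldl pvStep (d, c)).1,
       ((pvCutsFrom 0 row.dropLast).foldl pvStep (d, c)).2, 0 + row.dropLast.sum) := by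
  exact (pvA_idx row (fun q w =>
      let s' := q.2.2 + w
      let d' := q.1.modify s' 0 (· + 1)
      (d', max q.2.1 (d'.getD s' 0), s')) (d, c, 0)).trans
    (pvA_inner row.dropLast d c 0)

-- folding row by row equals folding the flat cut list
theorem pvFlat (bs : List (List Int)) (p : PySem.Dict Int Int × Int) :
    bs.foldl (fun p row => (pvCutsFrom 0 row.dropLast).foldl pvStep p) p
      = (pvCuts bs).foldl pvStep p := by
  induction bs generalizing p with
  | nil => simp [pvCuts]
  | cons r t ih => simp only [pvCuts, List.foldl_cons, List.flatMap_cons, List.foldl_append]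
                   exact ih _

theorem pvInv_step (d : PySem.Dict Int Int) (c x : Int) (h : pvInv d c) :
    pvInv (pvStep (d, c) x).1 (pvStep (d, c) x).2 := by
  obtain ⟨h0, hub, hat⟩ := h
  simp only [pvStep]
  rw [PySem.Dict.getD_modify_self]
  refine ⟨le_trans h0 (le_max_left _ _), ?_, ?_⟩
  · intro v
    rw [PySem.Dict.getD_modify]
    split_ifs with hv
    · exact le_max_right _ _
    · exact le_trans (hub v) (le_max_left _ _)
  · rcases le_or_gt c (d.getD x 0 + 1) with hle | hgt
    · right
      refine ⟨x, ?_⟩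
      rw [PySem.Dict.getD_modify, if_pos rfl]
      exact (max_eq_right hle).symm
    · rw [max_eq_left (le_of_lt hgt)]
      rcases hat with h | ⟨v, hv⟩
      · exact Or.inl h
      · right
        have hvx : v ≠ x := by
          intro e; subst e; omega
        refine ⟨v, ?_⟩
        rw [PySem.Dict.getD_modify, if_neg hvx]
        exact hv

theorem pvInv_fold (xs : List Int) (d : PySem.Dict Int Int) (c : Int) (h : pvInv d c) :
    pvInv (xs.foldl pvStep (d, c)).1 (xs.foldl pvStep (d, c)).2 := by
  induction xs generalizing d c with
  | nil => exact h
  | cons x t ih =>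
    have h' := pvInv_step d c x h
    simpa [List.foldl_cons] using ih _ _ h'

-- the dict component of the flat fold is the counting fold
theorem pvStep_fst (xs : List Int) (d : PySem.Dict Int Int) (c : Int) :
    (xs.foldl pvStep (d, c)).1 = xs.foldl (fun d x => d.modify x 0 (· + 1)) d := by
  induction xs generalizing d c with
  | nil => rfl
  | cons x t ih => simp only [List.foldl_cons, pvStep]; exact ih _ _

-- any c satisfying the invariant for counter xs is exactly max(values, default 0)
theorem pvInv_counter_max (xs : List Int) (c : Int)
    (h : pvInv (PySem.Dict.counter xs) c) :
    c = (PySem.List.max? (PySem.Dict.counter xs).values (fun y => y)).getD 0 := by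
  obtain ⟨h0, hub, hat⟩ := h
  have hvk := PySem.Dict.values_eq_map_keys (PySem.Dict.counter xs)
    (PySem.Dict.nodup_keys_counter xs) (0 : Int)
  rcases hM : PySem.List.max? (PySem.Dict.counter xs).values (fun y => y) with _ | M
  · have hvals : (PySem.Dict.counter xs).values = [] :=
      (PySem.List.max?_eq_none_iff _ _).mp hM
    rcases hat with h | ⟨v, hv⟩
    · simp [h]
    · by_cases hc : c = 0
      · simp [hc]
      · exfalso
        have hcont : (PySem.Dict.counter xs).contains v = true := by
          by_contra hnc
          rw [PySem.Dict.getD_of_not_contains _ _ (by simpa using hnc)] at hv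
          exact hc hv.symm
        have hk : v ∈ (PySem.Dict.counter xs).keys :=
          (PySem.Dict.contains_iff_mem_keys _ _).mp hcont
        have hcv : c ∈ (PySem.Dict.counter xs).values := by
          rw [hvk]
          exact List.mem_map.mpr ⟨v, hk, hv⟩
        rw [hvals] at hcv
        simp at hcv
  · simp only [Option.getD_some]
    have hmem := PySem.List.max?_mem hM
    have hmax := PySem.List.max?_isMax hM
    have hMle : M ≤ c := by
      rw [hvk] at hmem
      obtain ⟨k, _, hk⟩ := List.mem_map.mp hmem
      rw [← hk]; exact hub k
    have hcle : c ≤ M := by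
      rcases hat with h | ⟨v, hv⟩
      · rw [hvk] at hmem
        obtain ⟨k, hkmem, hk⟩ := List.mem_map.mp hmem
        rw [PySem.Dict.keys_counter, PySem.Set.mem_ofList] at hkmem
        have h1 : 1 ≤ xs.count k := List.one_le_count_iff.mpr hkmem
        rw [← hk, PySem.Dict.getD_counter, h]
        omega
      · by_cases hc : c = 0
        · rw [hvk] at hmem
          obtain ⟨k, _, hk⟩ := List.mem_map.mp hmem
          rw [← hk, PySem.Dict.getD_counter, hc]
          positivity
        · have hcont : (PySem.Dict.counter xs).contains v = true := by
            by_contra hnc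
            rw [PySem.Dict.getD_of_not_contains _ _ (by simpa using hnc)] at hv
            exact hc hv.symm
          have hk : v ∈ (PySem.Dict.counter xs).keys :=
            (PySem.Dict.contains_iff_mem_keys _ _).mp hcont
          have hcv : c ∈ (PySem.Dict.counter xs).values := by
            rw [hvk]
            exact List.mem_map.mpr ⟨v, hk, hv⟩
          exact hmax c hcv
    omega

-- the scan invariant: having consumed 'seen' (all ≤ p, with p its last value),
-- run counts p in seen, best bounds every count in seen and is attained (or 0);
-- then after consuming the sorted remainder l, best bounds and attains the
-- counts of seen ++ l.
theorem pvScan_inv (l : List Int) (seen : List Int) (best run p : Int)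
    (hsort : l.Pairwise (· ≤ ·))
    (hge : ∀ x ∈ l, p ≤ x)
    (hle : ∀ x ∈ seen, x ≤ p)
    (hrun : run = (seen.count p : Int))
    (hub : ∀ v, ((seen.count v : Int)) ≤ best)
    (hat : best = 0 ∨ ∃ v, ((seen.count v : Int)) = best) :
    (∀ v, (((seen ++ l).count v : Int)) ≤ (l.foldl pvScanStep (best, run, some p)).1) ∧
    ((l.foldl pvScanStep (best, run, some p)).1 = 0 ∨
      ∃ v, (((seen ++ l).count v : Int)) = (l.foldl pvScanStep (best, run, some p)).1) := by
  induction l generalizing seen best run p with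
  | nil => simpa using ⟨hub, hat⟩
  | cons c t ih =>
    have hpc : p ≤ c := hge c (List.mem_cons_self)
    rw [List.foldl_cons]
    have hstep : pvScanStep (best, run, some p) c
        = ((if (if c = p then run + 1 else 1) > best then (if c = p then run + 1 else 1) else best),
           (if c = p then run + 1 else 1), some c) := by
      simp only [pvScanStep, Option.some.injEq]
    rw [hstep]
    set run' : Int := if c = p then run + 1 else 1 with hrun'def
    set best' : Int := if run' > best then run' else best with hbest'def
    have hcount_seen_c : c ≠ p → seen.count c = 0 := by
      intro hne
      refine List.count_eq_zero.mpr ?_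
      intro hmem
      have := hle c hmem
      omega
    have hrun'_eq : run' = (((seen ++ [c]).count c : Int)) := by
      rw [List.count_append, List.count_singleton]
      by_cases h : c = p
      · subst h
        simp [hrun'def, hrun]
      · rw [hrun'def, if_neg h, hcount_seen_c h]
        simp
    have hrun'_pos : 1 ≤ run' := by
      rw [hrun'def]
      split_ifs with h
      · have : (0:Int) ≤ (seen.count p : Int) := by positivity
        omega
      · omega
    have hb'ge_run : run' ≤ best' := by
      rw [hbest'def]; split_ifs with h <;> omega
    have hb'ge_best : best ≤ best' := by
      rw [hbest'def]; split_ifs with h <;> omega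
    have hub' : ∀ v, (((seen ++ [c]).count v : Int)) ≤ best' := by
      intro v
      by_cases hvc : v = c
      · subst hvc; rw [← hrun'_eq]; exact hb'ge_run
      · rw [List.count_append, List.count_singleton, if_neg (by simp; exact fun e => hvc e.symm)]
        simp only [Nat.add_zero]
        exact le_trans (hub v) hb'ge_best
    have hat' : best' = 0 ∨ ∃ v, (((seen ++ [c]).count v : Int)) = best' := by
      rw [hbest'def]
      split_ifs with h
      · exact Or.inr ⟨c, hrun'_eq.symm⟩
      · by_cases hb0 : best = 0
        · exact Or.inl hb0
        · rcases hat with h0 | ⟨v, hv⟩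
          · exact Or.inl h0
          · right
            have hvc : v ≠ c := by
              intro e
              rw [e] at hv
              by_cases hcp : c = p
              · rw [hrun'def, if_pos hcp, hrun] at h
                rw [hcp] at hv
                omega
              · rw [hcount_seen_c hcp] at hv
                simp at hv
                exact hb0 hv.symm
            refine ⟨v, ?_⟩
            rw [List.count_append, List.count_singleton, if_neg (by simp; exact fun e => hvc e.symm)]
            simpa using hv
    have hres := ih (seen ++ [c]) best' run' c
      (List.Pairwise.of_cons hsort)
      (fun x hx => (List.pairwise_cons.mp hsort).1 x hx)
      (by intro x hx
          rcases List.mem_append.mp hx with h1 | h1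
          · exact le_trans (hle x h1) hpc
          · simp at h1; omega)
      hrun'_eq hub' hat'
    rw [List.append_assoc, List.singleton_append] at hres
    exact hres

-- the whole scan of a sorted list: its result bounds and attains the counts
theorem pvScan_sorted (l : List Int) (hsort : l.Pairwise (· ≤ ·)) :
    (∀ v, ((l.count v : Int)) ≤ (l.foldl pvScanStep (0, 0, none)).1) ∧
    ((l.foldl pvScanStep (0, 0, none)).1 = 0 ∨
      ∃ v, ((l.count v : Int)) = (l.foldl pvScanStep (0, 0, none)).1) := by
  rcases l with _ | ⟨c, t⟩
  · exact ⟨by intro v; simp, Or.inl rfl⟩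
  · rw [List.foldl_cons]
    have hstep : pvScanStep (0, 0, none) c = (1, 1, some c) := by
      simp [pvScanStep]
    rw [hstep]
    have hres := pvScan_inv t [c] 1 1 c
      (List.Pairwise.of_cons hsort)
      (fun x hx => (List.pairwise_cons.mp hsort).1 x hx)
      (by intro x hx; simp at hx; omega)
      (by simp)
      (by intro v
          have h : [c].count v ≤ [c].length := List.count_le_length
          simp at h ⊢
          omega)
      (Or.inr ⟨c, by simp⟩)
    rw [List.singleton_append] at hres
    exact hres

-- ===== VERDICT (by name: the statement is the Claim_ definition above) =====
theorem fewestNumber_spec : Claim_equal_fewestNumber := by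
  intro bricks _
  show fewestNumber bricks = fewestNumber_alt bricks
  show (bricks.length : Int) -
      (bricks.foldl
        (fun (p : PySem.Dict Int Int × Int) row =>
          (((PySem.List.pyRange 0 ((row.length : Int) - 1) 1).foldl
            (fun (q : PySem.Dict Int Int × Int × Int) i =>
              let s := q.2.2 + PySem.List.pyGetD row i 0
              let d := q.1.modify s 0 (· + 1)
              (d, max q.2.1 (d.getD s 0), s))
            (p.1, p.2, 0)).1,
           ((PySem.List.pyRange 0 ((row.length : Int) - 1) 1).foldl
            (fun (q : PySem.Dict Int Int × Int × Int) i =>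
              let s := q.2.2 + PySem.List.pyGetD row i 0
              let d := q.1.modify s 0 (· + 1)
              (d, max q.2.1 (d.getD s 0), s))
            (p.1, p.2, 0)).2.1))
        (PySem.Dict.empty, 0)).2
    = (bricks.length : Int) -
      ((PySem.List.sorted
        (bricks.foldl
          (fun (acc : List Int) row =>
            ((PySem.List.slice row none (some (-1))).foldl
              (fun (q : List Int × Int) w => (q.1 ++ [q.2 + w], q.2 + w)) (acc, 0)).1)
          []) (fun x => x) false).foldl pvScanStep (0, 0, none)).1
  have hB : bricks.foldl
      (fun (acc : List Int) row =>
        ((PySem.List.slice row none (some (-1))).foldl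
          (fun (q : List Int × Int) w => (q.1 ++ [q.2 + w], q.2 + w)) (acc, 0)).1)
      [] = pvCuts bricks := by
    have h1 : ∀ (acc : List Int) (row : List Int),
        ((PySem.List.slice row none (some (-1))).foldl
          (fun (q : List Int × Int) w => (q.1 ++ [q.2 + w], q.2 + w)) (acc, (0 : Int))).1
        = acc ++ pvCutsFrom 0 row.dropLast := by
      intro acc row
      rw [PySem.List.slice_to_neg_one, pvB_inner]
    calc bricks.foldl
          (fun (acc : List Int) row =>
            ((PySem.List.slice row none (some (-1))).foldl
              (fun (q : List Int × Int) w => (q.1 ++ [q.2 + w], q.2 + w)) (acc, 0)).1) []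
        = bricks.foldl (fun acc row => acc ++ pvCutsFrom 0 row.dropLast) [] :=
          PySem.List.foldl_congr_mem _ _ _ _ (fun acc row _ => h1 acc row)
      _ = pvCuts bricks := by
          rw [PySem.List.foldl_append_eq_flatMap]; simp [pvCuts]
  have hA : bricks.foldl
      (fun (p : PySem.Dict Int Int × Int) row =>
        (((PySem.List.pyRange 0 ((row.length : Int) - 1) 1).foldl
          (fun (q : PySem.Dict Int Int × Int × Int) i =>
            let s := q.2.2 + PySem.List.pyGetD row i 0
            let d := q.1.modify s 0 (· + 1)
            (d, max q.2.1 (d.getD s 0), s))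
          (p.1, p.2, 0)).1,
         ((PySem.List.pyRange 0 ((row.length : Int) - 1) 1).foldl
          (fun (q : PySem.Dict Int Int × Int × Int) i =>
            let s := q.2.2 + PySem.List.pyGetD row i 0
            let d := q.1.modify s 0 (· + 1)
            (d, max q.2.1 (d.getD s 0), s))
          (p.1, p.2, 0)).2.1))
      (PySem.Dict.empty, 0) = (pvCuts bricks).foldl pvStep (PySem.Dict.empty, 0) := by
    rw [← pvFlat]
    refine PySem.List.foldl_congr_mem _ _ _ _ ?_
    intro p row _
    rw [pvA_row row p.1 p.2]
  rw [hA, hB]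
  -- A's running max satisfies the invariant over Counter(cuts)
  have hd : ((pvCuts bricks).foldl pvStep (PySem.Dict.empty, 0)).1
      = PySem.Dict.counter (pvCuts bricks) := by
    rw [pvStep_fst, PySem.Dict.counter_eq_foldl]
  have hinvA := pvInv_fold (pvCuts bricks) PySem.Dict.empty 0
    ⟨le_refl 0, fun v => by simp [PySem.Dict.getD_empty], Or.inl rfl⟩
  rw [hd] at hinvA
  -- B's longest run also satisfies the invariant over Counter(cuts)
  have hperm : (PySem.List.sorted (pvCuts bricks) (fun x => x) false).Perm (pvCuts bricks) :=
    PySem.List.sorted_perm _ _ _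
  have hscan := pvScan_sorted (PySem.List.sorted (pvCuts bricks) (fun x => x) false)
    (PySem.List.sorted_pairwise _ _)
  have hcnt : ∀ v, (PySem.List.sorted (pvCuts bricks) (fun x => x) false).count v
      = (pvCuts bricks).count v := fun v => hperm.count_eq v
  have hinvB : pvInv (PySem.Dict.counter (pvCuts bricks))
      ((PySem.List.sorted (pvCuts bricks) (fun x => x) false).foldl pvScanStep (0, 0, none)).1 := by
    obtain ⟨hub, hat⟩ := hscan
    refine ⟨le_trans (by positivity) (hub 0), ?_, ?_⟩
    · intro v
      rw [PySem.Dict.getD_counter, ← hcnt v]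
      exact hub v
    · rcases hat with h | ⟨v, hv⟩
      · exact Or.inl h
      · exact Or.inr ⟨v, by rw [PySem.Dict.getD_counter, ← hcnt v]; exact hv⟩
  rw [pvInv_counter_max _ _ hinvA, pvInv_counter_max _ _ hinvB]
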